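-- pv_equiv track=rewrite | github.com/toshikistan/Hillel_pro_hw | HW14/task2.py | stone_pick
-- ===== SOURCE A (Python) =====
-- def stone_pick(arr):
--     stick = 0
--     cobble = 0
--     wood_count = 0
--     pickaxe = 0
--     for item in arr:
--         if item == "Sticks":
--             stick += 1
--         elif item == "Cobblestone":
--             cobble += 1
--         elif item == "Wood":
--             stick += 4
--
--     while stick >= 2 and cobble >= 3:
--         stick -= 2
--         cobble -= 3
--         pickaxe += 1
--     return pickaxe
-- ===== SOURCE B (Python) =====
-- def stone_pick(arr):
--     stick = arr.count("Sticks") + 4 * arr.count("Wood")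
--     cobble = arr.count("Cobblestone")
--     return min(stick // 2, cobble // 3)
-- ===== Notes on version B (the rewrite author's own statement) =====
-- stated objective: simpler
-- what changed: Counting is done with list.count instead of a branching loop, and the while-loop of repeated subtraction is replaced by the closed form min(stick // 2, cobble // 3).
import Mathlib
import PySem

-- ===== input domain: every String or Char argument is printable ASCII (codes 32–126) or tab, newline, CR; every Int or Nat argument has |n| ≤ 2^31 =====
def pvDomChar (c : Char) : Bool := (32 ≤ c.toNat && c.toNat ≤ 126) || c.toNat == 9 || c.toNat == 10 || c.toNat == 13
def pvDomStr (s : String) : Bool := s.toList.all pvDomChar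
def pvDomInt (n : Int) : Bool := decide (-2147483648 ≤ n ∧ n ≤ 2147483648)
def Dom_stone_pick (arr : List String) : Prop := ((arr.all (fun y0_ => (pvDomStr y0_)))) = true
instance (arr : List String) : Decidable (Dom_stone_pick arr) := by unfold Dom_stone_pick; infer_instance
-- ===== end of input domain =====

-- B replaces A's branching counting loop by list.count calls and A's repeated-subtraction
-- while-loop by the closed form min(stick // 2, cobble // 3); objective: simpler.

-- ===== PORT A =====
-- the 'while stick >= 2 and cobble >= 3' loop of A, transcribed as recursion on the same state
def stonePickLoop (stick cobble pickaxe : Int) : Int :=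
  if stick ≥ 2 ∧ cobble ≥ 3 then stonePickLoop (stick - 2) (cobble - 3) (pickaxe + 1)
  else pickaxe
termination_by stick.toNat
decreasing_by omega

def stone_pick (arr : List String) : Int :=
  -- stick = 0; cobble = 0; for item in arr: …  (wood_count and pickaxe=0 initialisations kept implicit)
  let sc : Int × Int := arr.foldl (fun st item =>
    if item = "Sticks" then (st.1 + 1, st.2)
    else if item = "Cobblestone" then (st.1, st.2 + 1)
    else if item = "Wood" then (st.1 + 4, st.2)
    else st) (0, 0)
  stonePickLoop sc.1 sc.2 0

-- ===== PORT B =====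
def stone_pick_alt (arr : List String) : Int :=
  let stick : Int := (PySem.List.count arr "Sticks" : Int) + 4 * (PySem.List.count arr "Wood" : Int)
  let cobble : Int := (PySem.List.count arr "Cobblestone" : Int)
  min (PySem.Int.floordiv stick 2) (PySem.Int.floordiv cobble 3)

-- ===== PRECONDITION & SPEC =====
def Spec_stone_pick (arr : List String) (out : Int) : Prop := out = stone_pick_alt arr
instance (arr : List String) (out : Int) : Decidable (Spec_stone_pick arr out) := by unfold Spec_stone_pick; infer_instance

-- ===== CLAIM (what is proved, stated in full; the proofs are below) =====
def Claim_equal_stone_pick : Prop := ∀ (arr : List String), Dom_stone_pick arr → Spec_stone_pick arr (stone_pick arr)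

-- ===== LEMMAS AND PROOFS =====

-- the while-loop computes p + min(s // 2, c // 3) on nonnegative state
theorem stonePickLoop_eq (s c p : Int) (hs : 0 ≤ s) (hc : 0 ≤ c) :
    stonePickLoop s c p = p + min (PySem.Int.floordiv s 2) (PySem.Int.floordiv c 3) := by
  induction s, c, p using stonePickLoop.induct with
  | case1 s c p h ih =>
    rw [stonePickLoop, if_pos h, ih (by omega) (by omega)]
    rw [PySem.Int.floordiv_eq_ediv_of_pos (by norm_num), PySem.Int.floordiv_eq_ediv_of_pos (by norm_num),
        PySem.Int.floordiv_eq_ediv_of_pos (a := s) (by norm_num), PySem.Int.floordiv_eq_ediv_of_pos (a := c) (by norm_num)]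
    omega
  | case2 s c p h =>
    rw [stonePickLoop, if_neg h]
    rw [PySem.Int.floordiv_eq_ediv_of_pos (a := s) (by norm_num), PySem.Int.floordiv_eq_ediv_of_pos (a := c) (by norm_num)]
    omega

-- A's counting fold equals the three counts
theorem fold_counts (arr : List String) (s c : Int) :
    arr.foldl (fun (st : Int × Int) item =>
      if item = "Sticks" then (st.1 + 1, st.2)
      else if item = "Cobblestone" then (st.1, st.2 + 1)
      else if item = "Wood" then (st.1 + 4, st.2)
      else st) (s, c)
    = (s + (List.count "Sticks" arr : Int) + 4 * (List.count "Wood" arr : Int),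
       c + (List.count "Cobblestone" arr : Int)) := by
  induction arr generalizing s c with
  | nil => simp
  | cons x xs ih =>
    simp only [List.foldl_cons, List.count_cons]
    by_cases h1 : x = "Sticks"
    · simp [h1, ih]
      push_cast; ring
    · by_cases h2 : x = "Cobblestone"
      · simp [h2, ih]; push_cast; ring
      · by_cases h3 : x = "Wood"
        · simp [h3, ih]; push_cast; ring
        · simp [h1, h2, h3, ih]

-- ===== VERDICT (by name: the statement is the Claim_ definition above) =====
theorem stone_pick_spec : Claim_equal_stone_pick := by
  intro arr _
  unfold Spec_stone_pick stone_pick stone_pick_alt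
  simp only [fold_counts, PySem.List.count_eq]
  rw [stonePickLoop_eq _ _ _ (by positivity) (by positivity)]
  norm_num
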